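-- pv_equiv track=rewrite | github.com/Abedishere/Unicode | utils/history.py | _enforce_word_limit
-- ===== SOURCE A (Python) =====
-- _MAX_BODY_WORDS = 400  # hard cap enforced in code after the agent responds
--
-- def _enforce_word_limit(text: str, max_words: int = _MAX_BODY_WORDS) -> str:
--     """Truncate *text* to *max_words* words, cutting at the last newline before
--     the limit so we never break mid-sentence or mid-bullet."""
--     words = text.split()
--     if len(words) <= max_words:
--         return text
--     # Find the character position of word max_words
--     pos = 0
--     for word in words[:max_words]:
--         pos = text.index(word, pos) + len(word)
--     # Cut back to the last newline so we don't leave a ragged line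
--     cut = text.rfind("\n", 0, pos)
--     trimmed = text[:cut].rstrip() if cut != -1 else text[:pos].rstrip()
--     return trimmed + "\n\n*(body trimmed to stay within the 400-word limit)*"
-- ===== SOURCE B (Python) =====
-- import re
--
-- _MAX_BODY_WORDS = 400
--
-- def _enforce_word_limit(text: str, max_words: int = _MAX_BODY_WORDS) -> str:
--     """Truncate *text* to *max_words* words, cutting at the last newline before
--     the limit so we never break mid-sentence or mid-bullet."""
--     ends = [m.end() for m in re.finditer(r'\S+', text)]
--     if len(ends) <= max_words:
--         return text
--     kept = ends[:max_words]
--     pos = kept[-1] if kept else 0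
--     cut = text.rfind("\n", 0, pos)
--     trimmed = (text[:cut] if cut != -1 else text[:pos]).rstrip()
--     return trimmed + "\n\n*(body trimmed to stay within the 400-word limit)*"
-- ===== Notes on version B (the rewrite author's own statement) =====
-- stated objective: alternative
-- what changed: B collects every word's end offset in one regex scan (re.finditer(r'\S+')) and takes the last end of the kept slice directly, replacing A's split() plus the advancing text.index loop.
import Mathlib
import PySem

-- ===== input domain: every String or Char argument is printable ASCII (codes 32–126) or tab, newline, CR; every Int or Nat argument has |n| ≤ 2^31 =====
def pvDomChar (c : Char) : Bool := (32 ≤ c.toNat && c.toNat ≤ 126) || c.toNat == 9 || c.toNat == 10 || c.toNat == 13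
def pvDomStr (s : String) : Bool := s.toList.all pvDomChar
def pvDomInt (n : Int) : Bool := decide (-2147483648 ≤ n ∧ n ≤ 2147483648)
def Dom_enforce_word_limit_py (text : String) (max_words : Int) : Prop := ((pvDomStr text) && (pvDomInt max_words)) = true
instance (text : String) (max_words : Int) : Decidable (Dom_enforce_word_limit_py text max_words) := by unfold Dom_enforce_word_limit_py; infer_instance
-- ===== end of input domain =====

-- B replaces A's split() plus the advancing text.index loop by one left-to-right scan that
-- records every word's end offset, then takes the last end of the kept slice; same return
-- value on every input (proved below).

-- ===== PORT A =====
-- Literal port of A on the PySem.Chars (List Char) side: words = text.split(); early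
-- return; the pos-advancing loop with text.index(word, pos) ported as
-- PySem.Chars.findFrom (A's index never raises: each word occurs at or after pos);
-- then rfind, rstrip, slice and the appended message, step for step.
def enforce_word_limit_py (text : String) (max_words : Int) : String :=
  let cs := text.toList
  let words := PySem.Chars.split₀ cs
  if (words.length : Int) ≤ max_words then text
  else
    let pos : Int :=
      (PySem.List.slice words none (some max_words)).foldl
        (fun pos w => PySem.Chars.findFrom cs w pos none + (w.length : Int)) 0
    let cut := PySem.Chars.rfindFrom cs ['\n'] 0 (some pos)
    let trimmed :=
      if cut ≠ -1 then PySem.Chars.rstrip (PySem.Chars.slice cs none (some cut))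
      else PySem.Chars.rstrip (PySem.Chars.slice cs none (some pos))
    String.ofList (trimmed ++ "\n\n*(body trimmed to stay within the 400-word limit)*".toList)

-- ===== PORT B =====
-- Hand port of Source B's `[m.end() for m in re.finditer(r'\S+', text)]` (no PySem regex
-- primitive): one scan collecting the end index of every maximal run of non-whitespace
-- characters; exact for \S+ since \S = not str.isspace on this ASCII domain.
-- `inw` = "currently inside a word".
def pvWordEnds : List Char → Nat → Bool → List Nat
  | [], i, inw => if inw then [i] else []
  | c :: rest, i, inw =>
    if PySem.Chars.isspace c then
      (if inw then i :: pvWordEnds rest (i + 1) false else pvWordEnds rest (i + 1) false)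
    else pvWordEnds rest (i + 1) true

def enforce_word_limit_py_alt (text : String) (max_words : Int) : String :=
  let cs := text.toList
  let ends := pvWordEnds cs 0 false
  if (ends.length : Int) ≤ max_words then text
  else
    let kept := PySem.List.slice ends none (some max_words)
    -- `kept[-1] if kept else 0`; pyGet? kept (-1) is never none on a non-empty list
    let pos : Int := if !kept.isEmpty then ((PySem.List.pyGet? kept (-1)).getD 0 : Nat) else 0
    let cut := PySem.Chars.rfindFrom cs ['\n'] 0 (some pos)
    let trimmed :=
      PySem.Chars.rstrip
        (if cut ≠ -1 then PySem.Chars.slice cs none (some cut)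
         else PySem.Chars.slice cs none (some pos))
    String.ofList (trimmed ++ "\n\n*(body trimmed to stay within the 400-word limit)*".toList)

-- ===== PRECONDITION & SPEC =====
-- no Pre_: A is total, and B reproduces it on every input
def Spec_enforce_word_limit_py (text : String) (max_words : Int) (out : String) : Prop :=
  out = enforce_word_limit_py_alt text max_words
instance (text : String) (max_words : Int) (out : String) : Decidable (Spec_enforce_word_limit_py text max_words out) := by
  unfold Spec_enforce_word_limit_py; infer_instance

-- ===== CLAIM (what is proved, stated in full; the proofs are below) =====
def Claim_equal_enforce_word_limit_py : Prop := ∀ (text : String) (max_words : Int), Dom_enforce_word_limit_py text max_words → Spec_enforce_word_limit_py text max_words (enforce_word_limit_py text max_words)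

-- ===== LEMMAS AND PROOFS =====

-- The common reference both ports are reduced to: the tokens of cs read from base
-- index i, i.e. the (absolute start index, word) of every maximal non-whitespace run.
def pvToks : List Char → Nat → List (Nat × List Char)
  | [], _ => []
  | c :: rest, i =>
    if PySem.Chars.isspace c then pvToks rest (i + 1)
    else
      let w := List.takeWhile (fun a => !PySem.Chars.isspace a) (c :: rest)
      (i, w) :: pvToks (List.dropWhile (fun a => !PySem.Chars.isspace a) (c :: rest)) (i + w.length)
termination_by cs _ => cs.length
decreasing_by
  · simp
  · rename_i h
    rw [List.dropWhile_cons, if_pos (by simp [h])]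
    have := List.length_dropWhile_le (fun a => !PySem.Chars.isspace a) rest
    simp only [List.length_cons]
    omega

theorem pv_go_take (w : List Char) (hw : ∀ a ∈ w, PySem.Chars.isspace a = false) :
    ∀ (rest cur : List Char) (acc : List (List Char)),
    PySem.Chars.split₀.go (w ++ rest) cur acc = PySem.Chars.split₀.go rest (w.reverse ++ cur) acc := by
  induction w with
  | nil => intro rest cur acc; simp
  | cons a t ih =>
    intro rest cur acc
    have ha := hw a (by simp)
    rw [List.cons_append, PySem.Chars.split₀.go, if_neg (by simp [ha])]
    rw [ih (fun x hx => hw x (by simp [hx])) rest (a :: cur) acc]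
    simp

theorem pv_split_toks : ∀ (cs : List Char) (acc : List (List Char)) (i : Nat),
    PySem.Chars.split₀.go cs [] acc = acc.reverse ++ (pvToks cs i).map Prod.snd
  | [], acc, i => by simp [PySem.Chars.split₀.go, pvToks]
  | c :: rest, acc, i => by
    by_cases hc : PySem.Chars.isspace c
    · rw [PySem.Chars.split₀.go, if_pos hc]
      simp only [List.isEmpty_nil, pvToks, if_pos hc]
      exact pv_split_toks rest acc (i + 1)
    · have hw : ∀ a ∈ List.takeWhile (fun a => !PySem.Chars.isspace a) (c :: rest),
          PySem.Chars.isspace a = false := by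
        intro a ha; simpa using List.mem_takeWhile_imp ha
      have hsplit := List.takeWhile_append_dropWhile
        (p := fun a => !PySem.Chars.isspace a) (l := c :: rest)
      have hne : List.takeWhile (fun a => !PySem.Chars.isspace a) (c :: rest) ≠ [] := by
        rw [List.takeWhile_cons, if_pos (by simp [hc])]; simp
      rw [pvToks, if_neg hc]
      conv_lhs => rw [← hsplit]
      rw [pv_go_take _ hw _ [] acc]
      rcases hdw : List.dropWhile (fun a => !PySem.Chars.isspace a) (c :: rest) with _ | ⟨d, t⟩
      · rw [PySem.Chars.split₀.go]
        simp [pvToks, hne]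
      · have hd : PySem.Chars.isspace d := by
          have := List.head?_dropWhile_not (fun a => !PySem.Chars.isspace a) (c :: rest)
          rw [hdw] at this; simpa using this
        rw [PySem.Chars.split₀.go, if_pos hd, if_neg (by simpa using hne)]
        simp only [List.append_nil, List.reverse_reverse]
        rw [pv_split_toks t ((List.takeWhile (fun a => !PySem.Chars.isspace a) (c :: rest)) :: acc)
          (i + (List.takeWhile (fun a => !PySem.Chars.isspace a) (c :: rest)).length + 1)]
        rw [pvToks, if_pos hd]
        simp
termination_by cs _ _ => cs.length
decreasing_by
  all_goals simp only [List.length_cons]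
  all_goals first
  | omega
  | (have h1 := List.length_dropWhile_le (fun a => !PySem.Chars.isspace a) (c :: rest)
     rw [hdw] at h1; simp only [List.length_cons] at h1; omega)

theorem pv_we_take (w : List Char) (hw : ∀ a ∈ w, PySem.Chars.isspace a = false) (hne : w ≠ []) :
    ∀ (rest : List Char) (i : Nat) (b : Bool),
    pvWordEnds (w ++ rest) i b = pvWordEnds rest (i + w.length) true := by
  induction w with
  | nil => exact absurd rfl hne
  | cons a t ih =>
    intro rest i b
    have ha := hw a (by simp)
    rw [List.cons_append, pvWordEnds, if_neg (by simp [ha])]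
    rcases eq_or_ne t [] with rfl | ht
    · simp
    · rw [ih (fun x hx => hw x (by simp [hx])) ht rest (i + 1) true]
      simp; ring_nf

theorem pv_ends_toks : ∀ (cs : List Char) (i : Nat),
    pvWordEnds cs i false = (pvToks cs i).map (fun t => t.1 + t.2.length)
  | [], i => by simp [pvWordEnds, pvToks]
  | c :: rest, i => by
    by_cases hc : PySem.Chars.isspace c
    · rw [pvWordEnds, if_pos hc, if_neg (by simp), pvToks, if_pos hc]
      exact pv_ends_toks rest (i + 1)
    · have hw : ∀ a ∈ List.takeWhile (fun a => !PySem.Chars.isspace a) (c :: rest),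
          PySem.Chars.isspace a = false := by
        intro a ha; simpa using List.mem_takeWhile_imp ha
      have hsplit := List.takeWhile_append_dropWhile
        (p := fun a => !PySem.Chars.isspace a) (l := c :: rest)
      have hne : List.takeWhile (fun a => !PySem.Chars.isspace a) (c :: rest) ≠ [] := by
        rw [List.takeWhile_cons, if_pos (by simp [hc])]; simp
      rw [pvToks, if_neg hc]
      conv_lhs => rw [← hsplit]
      rw [pv_we_take _ hw hne _ i false]
      rcases hdw : List.dropWhile (fun a => !PySem.Chars.isspace a) (c :: rest) with _ | ⟨d, t⟩
      · simp [pvWordEnds, pvToks]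
      · have hd : PySem.Chars.isspace d := by
          have := List.head?_dropWhile_not (fun a => !PySem.Chars.isspace a) (c :: rest)
          rw [hdw] at this; simpa using this
        rw [pvWordEnds, if_pos hd, if_pos rfl]
        rw [pv_ends_toks t (i + (List.takeWhile (fun a => !PySem.Chars.isspace a) (c :: rest)).length + 1)]
        simp [pvToks, hd]
termination_by cs _ => cs.length
decreasing_by
  all_goals simp only [List.length_cons]
  all_goals first
  | omega
  | (have h1 := List.length_dropWhile_le (fun a => !PySem.Chars.isspace a) (c :: rest)
     rw [hdw] at h1; simp only [List.length_cons] at h1; omega)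

def pvPrev (T : List (Nat × List Char)) (i j : Nat) : Nat :=
  if j = 0 then i else (T[j-1]?.map (fun t => t.1 + t.2.length)).getD i

theorem pv_toks_geom : ∀ (cs : List Char) (i j : Nat), j < (pvToks cs i).length →
    (pvToks cs i)[j]!.2 ≠ [] ∧
    (∀ a ∈ (pvToks cs i)[j]!.2, PySem.Chars.isspace a = false) ∧
    i ≤ pvPrev (pvToks cs i) i j ∧
    pvPrev (pvToks cs i) i j ≤ (pvToks cs i)[j]!.1 ∧
    (pvToks cs i)[j]!.1 + (pvToks cs i)[j]!.2.length ≤ i + cs.length ∧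
    (∀ p, pvPrev (pvToks cs i) i j ≤ p → p < (pvToks cs i)[j]!.1 →
        ∃ c', cs[p - i]? = some c' ∧ PySem.Chars.isspace c' = true) ∧
    (pvToks cs i)[j]!.2 <+: cs.drop ((pvToks cs i)[j]!.1 - i)
  | [], i, j, hj => by simp [pvToks] at hj
  | c :: rest, i, j, hj => by
    by_cases hc : PySem.Chars.isspace c
    · rw [pvToks, if_pos hc] at hj ⊢
      obtain ⟨h1, h2, h3, h4, h5, h6, h7⟩ := pv_toks_geom rest (i + 1) j hj
      have heq : j ≠ 0 → pvPrev (pvToks rest (i + 1)) i j = pvPrev (pvToks rest (i + 1)) (i + 1) j := by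
        intro hj0; unfold pvPrev; rw [if_neg hj0, if_neg hj0]
        have hj1 : j - 1 < (pvToks rest (i + 1)).length := by omega
        simp [List.getElem?_eq_getElem hj1]
      have hI : i ≤ pvPrev (pvToks rest (i + 1)) i j := by
        rcases eq_or_ne j 0 with rfl | hj0
        · simp [pvPrev]
        · rw [heq hj0]; omega
      have hP : pvPrev (pvToks rest (i + 1)) i j ≤ (pvToks rest (i + 1))[j]!.1 := by
        rcases eq_or_ne j 0 with rfl | hj0
        · have h4' := h4; simp [pvPrev] at h4' ⊢; omega
        · rw [heq hj0]; exact h4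
      refine ⟨h1, h2, hI, hP, by simp only [List.length_cons]; omega, ?_, ?_⟩
      · intro p hp1 hp2
        rcases Nat.lt_or_ge p (i + 1) with hpi | hpi
        · have hpi' : p = i := by omega
          subst hpi'
          exact ⟨c, by simp, hc⟩
        · have hp1' : pvPrev (pvToks rest (i + 1)) (i + 1) j ≤ p := by
            rcases eq_or_ne j 0 with rfl | hj0
            · simpa [pvPrev] using hpi
            · rw [← heq hj0]; exact hp1
          obtain ⟨c', hc1, hc2⟩ := h6 p hp1' hp2
          refine ⟨c', ?_, hc2⟩
          have hpe : p - i = (p - (i + 1)) + 1 := by omega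
          rw [hpe, List.getElem?_cons_succ]
          exact hc1
      · have hs : i + 1 ≤ (pvToks rest (i + 1))[j]!.1 := by omega
        have hde : (pvToks rest (i + 1))[j]!.1 - i = ((pvToks rest (i + 1))[j]!.1 - (i + 1)) + 1 := by omega
        rw [hde, List.drop_succ_cons]
        exact h7
    · rw [pvToks, if_neg hc] at hj ⊢
      set tw := List.takeWhile (fun a => !PySem.Chars.isspace a) (c :: rest) with htw
      set dw := List.dropWhile (fun a => !PySem.Chars.isspace a) (c :: rest) with hdw
      have hw : ∀ a ∈ tw, PySem.Chars.isspace a = false := by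
        intro a ha; rw [htw] at ha; simpa using List.mem_takeWhile_imp ha
      have hsplit : tw ++ dw = c :: rest := by rw [htw, hdw]; exact List.takeWhile_append_dropWhile
      have hne : tw ≠ [] := by
        rw [htw, List.takeWhile_cons, if_pos (by simp [hc])]; simp
      have hpre : tw <+: c :: rest := by rw [htw]; exact List.takeWhile_prefix _
      have hlen : tw.length + dw.length = rest.length + 1 := by
        have := congrArg List.length hsplit
        simpa using this
      clear_value tw dw
      match j, hj with
      | 0, hj =>
        refine ⟨?_, ?_, ?_, ?_, ?_, ?_, ?_⟩
        · simpa using hne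
        · simpa using hw
        · simp [pvPrev]
        · simp [pvPrev]
        · simp only [List.getElem!_cons_zero, List.length_cons]
          omega
        · intro p hp1 hp2
          simp [pvPrev] at hp1
          simp at hp2
          omega
        · simpa using hpre
      | j' + 1, hj =>
        have hj' : j' < (pvToks dw (i + tw.length)).length := by
          simpa using hj
        obtain ⟨h1, h2, h3, h4, h5, h6, h7⟩ := pv_toks_geom dw (i + tw.length) j' hj'
        have hgetj : ((i, tw) :: pvToks dw (i + tw.length))[j' + 1]!
            = (pvToks dw (i + tw.length))[j']! := by
          simp
        have hprevq : pvPrev ((i, tw) :: pvToks dw (i + tw.length)) i (j' + 1)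
            = pvPrev (pvToks dw (i + tw.length)) (i + tw.length) j' := by
          rcases eq_or_ne j' 0 with rfl | hj0
          · simp [pvPrev]
          · unfold pvPrev
            rw [if_neg (by omega), if_neg hj0]
            have hje : j' + 1 - 1 = (j' - 1) + 1 := by omega
            rw [hje, List.getElem?_cons_succ]
            have hj1 : j' - 1 < (pvToks dw (i + tw.length)).length := by omega
            simp [List.getElem?_eq_getElem hj1]
        rw [hgetj, hprevq]
        refine ⟨h1, h2, by have := h3; omega, h4, ?_, ?_, ?_⟩
        · simp only [List.length_cons]
          omega
        · intro p hp1 hp2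
          obtain ⟨c', hc1, hc2⟩ := h6 p hp1 hp2
          refine ⟨c', ?_, hc2⟩
          conv_lhs => rw [← hsplit]
          rw [List.getElem?_append_right (by have := h3; omega)]
          have hix : p - i - tw.length = p - (i + tw.length) := by omega
          rw [hix]
          exact hc1
        · conv_rhs => rw [← hsplit]
          rw [List.drop_append]
          rw [List.drop_eq_nil_of_le (by have := h3; have := h4; omega), List.nil_append]
          have hix : (pvToks dw (i + tw.length))[j']!.1 - i - tw.length
              = (pvToks dw (i + tw.length))[j']!.1 - (i + tw.length) := by omega
          rw [hix]
          exact h7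
termination_by cs _ _ _ => cs.length
decreasing_by
  all_goals simp only [List.length_cons]
  all_goals first
  | omega
  | (rw [htw] at hne hlen
     rw [hdw] at hlen
     have htp : (List.takeWhile (fun a => !PySem.Chars.isspace a) (c :: rest)).length ≠ 0 := by
       simpa using hne
     omega)

theorem pv_find_at (cs : List Char) (pos s : Nat) (w : List Char)
    (h1 : pos ≤ s) (h2 : s ≤ cs.length)
    (hgap : ∀ p, pos ≤ p → p < s → ∃ c', cs[p]? = some c' ∧ PySem.Chars.isspace c' = true)
    (hpre : w <+: cs.drop s) (hne : w ≠ [])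
    (hns : ∀ a ∈ w, PySem.Chars.isspace a = false) :
    PySem.Chars.findFrom cs w (pos : Int) none = (s : Int) := by
  rw [PySem.Chars.findFrom_natCast cs w pos (le_trans h1 h2)]
  have hdd : (cs.drop pos).drop (s - pos) = cs.drop s := by
    rw [List.drop_drop]
    congr 1
    omega
  have hinf : w <:+: cs.drop pos := by
    refine (List.IsPrefix.isInfix ?_).trans (List.IsSuffix.isInfix (List.drop_suffix (s - pos) _))
    rw [hdd]; exact hpre
  have hfind0 : 0 ≤ PySem.Chars.find (cs.drop pos) w := (PySem.Chars.find_nonneg_iff _ _).mpr hinf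
  obtain ⟨hf1, hf2⟩ := PySem.Chars.find_spec hfind0
  have hfle : (PySem.Chars.find (cs.drop pos) w).toNat ≤ s - pos := by
    by_contra h
    exact hf2 (s - pos) (by omega) (by rw [hdd]; exact hpre)
  have hfge : ¬ (PySem.Chars.find (cs.drop pos) w).toNat < s - pos := by
    intro hlt
    obtain ⟨a, t, hw⟩ := List.exists_cons_of_ne_nil hne
    subst hw
    obtain ⟨r, hr⟩ := hf1
    have hhead : cs[pos + (PySem.Chars.find (cs.drop pos) (a :: t)).toNat]? = some a := by
      have h0 := congrArg (fun l => l[0]?) hr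
      simpa [List.drop_drop] using h0.symm
    obtain ⟨c', hc1, hc2⟩ := hgap (pos + (PySem.Chars.find (cs.drop pos) (a :: t)).toNat)
      (by omega) (by omega)
    rw [hhead] at hc1
    have hca : c' = a := by injection hc1.symm
    subst hca
    have hfa := hns c' (by simp)
    rw [hc2] at hfa
    exact Bool.noConfusion hfa
  have hf : PySem.Chars.find (cs.drop pos) w = ((s - pos : Nat) : Int) := by
    have := Int.toNat_of_nonneg hfind0
    omega
  rw [hf]
  rw [if_neg (by omega)]
  omega

def pvEnd (T : List (Nat × List Char)) (j : Nat) : Nat := T[j]!.1 + T[j]!.2.length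

theorem pv_fold_ends (cs : List Char) : ∀ (k : Nat), k ≤ (pvToks cs 0).length →
    (((pvToks cs 0).take k).map Prod.snd).foldl
        (fun pos w => PySem.Chars.findFrom cs w pos none + (w.length : Int)) 0 =
      (if k = 0 then (0 : Int) else (pvEnd (pvToks cs 0) (k-1) : Int)) := by
  intro k
  induction k with
  | zero => simp
  | succ k ih =>
    intro hk
    have hk' : k < (pvToks cs 0).length := by omega
    rw [List.take_add_one, List.getElem?_eq_getElem hk']
    simp only [Option.toList_some, List.map_append, List.foldl_append, List.map_cons,
      List.map_nil, List.foldl_cons, List.foldl_nil]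
    rw [ih (by omega)]
    obtain ⟨g1, g2, g3, g4, g5, g6, g7⟩ := pv_toks_geom cs 0 k hk'
    have hbang : (pvToks cs 0)[k]! = (pvToks cs 0)[k]'hk' := getElem!_pos (pvToks cs 0) k hk'
    have hprev : (if k = 0 then (0 : Int) else (pvEnd (pvToks cs 0) (k-1) : Int))
        = ((pvPrev (pvToks cs 0) 0 k : Nat) : Int) := by
      rcases eq_or_ne k 0 with rfl | hk0
      · simp [pvPrev]
      · rw [if_neg hk0]
        unfold pvPrev pvEnd
        rw [if_neg hk0]
        have hk1 : k - 1 < (pvToks cs 0).length := by omega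
        rw [List.getElem?_eq_getElem hk1, getElem!_pos (pvToks cs 0) (k-1) hk1]
        simp
    rw [hprev]
    rw [hbang] at g1 g2 g4 g5 g6 g7
    rw [pv_find_at cs (pvPrev (pvToks cs 0) 0 k) ((pvToks cs 0)[k]'hk').1
        ((pvToks cs 0)[k]'hk').2 g4 (by omega)
        (by intro p hp1 hp2; simpa using g6 p hp1 hp2)
        (by simpa using g7) g1 g2]
    rw [if_neg (by omega)]
    unfold pvEnd
    simp only [Nat.add_sub_cancel, hbang]
    push_cast
    ring

theorem pv_slice_take {α : Type} (xs : List α) (i : Int) :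
    PySem.List.slice xs none (some i) = xs.take (PySem.List.clampIdx xs.length i) := by
  simp [PySem.List.slice]

theorem pv_main (text : String) (max_words : Int) :
    enforce_word_limit_py text max_words = enforce_word_limit_py_alt text max_words := by
  unfold enforce_word_limit_py enforce_word_limit_py_alt
  set cs := text.toList with hcs
  have hW : PySem.Chars.split₀ cs = (pvToks cs 0).map Prod.snd := by
    have := pv_split_toks cs [] 0
    simpa [PySem.Chars.split₀] using this
  have hE : pvWordEnds cs 0 false = (pvToks cs 0).map (fun t => t.1 + t.2.length) :=
    pv_ends_toks cs 0
  have hlen : (PySem.Chars.split₀ cs).length = (pvWordEnds cs 0 false).length := by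
    rw [hW, hE]; simp
  by_cases hg : ((PySem.Chars.split₀ cs).length : Int) ≤ max_words
  · rw [if_pos hg, if_pos (by rw [← hlen]; exact hg)]
  · rw [if_neg hg, if_neg (by rw [← hlen]; exact hg)]
    set K : Nat := PySem.List.clampIdx (pvWordEnds cs 0 false).length max_words with hKdef
    have hElen : (pvWordEnds cs 0 false).length = (pvToks cs 0).length := by
      rw [hE]; simp
    have hKle : K ≤ (pvToks cs 0).length := by
      rw [hKdef, ← hElen]
      exact PySem.List.clampIdx_le _ _
    have hclampA : PySem.List.clampIdx (PySem.Chars.split₀ cs).length max_words = K := by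
      rw [hlen, hKdef]
    have hposA :
        (PySem.List.slice (PySem.Chars.split₀ cs) none (some max_words)).foldl
          (fun pos w => PySem.Chars.findFrom cs w pos none + (w.length : Int)) 0
        = (if K = 0 then (0 : Int) else (pvEnd (pvToks cs 0) (K-1) : Int)) := by
      rw [pv_slice_take, hclampA, hW, ← List.map_take]
      exact pv_fold_ends cs K hKle
    have hkept : PySem.List.slice (pvWordEnds cs 0 false) none (some max_words)
        = (pvWordEnds cs 0 false).take K := by
      rw [pv_slice_take, hKdef]
    have hkeptlen : ((pvWordEnds cs 0 false).take K).length = K := by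
      simp
      omega
    have hposB :
        (if !(PySem.List.slice (pvWordEnds cs 0 false) none (some max_words)).isEmpty
          then (((PySem.List.pyGet? (PySem.List.slice (pvWordEnds cs 0 false) none (some max_words)) (-1)).getD 0 : Nat) : Int)
          else 0)
        = (if K = 0 then (0 : Int) else (pvEnd (pvToks cs 0) (K-1) : Int)) := by
      rw [hkept]
      rcases eq_or_ne K 0 with hK | hK0
      · rw [hK]
        simp
      · have hkne : ((pvWordEnds cs 0 false).take K).isEmpty = false := by
          rw [List.isEmpty_eq_false_iff_exists_mem]
          have : 0 < ((pvWordEnds cs 0 false).take K).length := by omega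
          exact ⟨_, List.getElem_mem this⟩
        rw [hkne]
        simp only [Bool.not_false, if_neg hK0]
        rw [PySem.List.pyGet?_neg_one, List.getLast?_eq_getElem?]
        rw [hkeptlen]
        have hk1 : K - 1 < K := by omega
        rw [List.getElem?_take_of_lt hk1]
        have hk1' : K - 1 < (pvWordEnds cs 0 false).length := by omega
        rw [List.getElem?_eq_getElem hk1']
        have hk1'' : K - 1 < (pvToks cs 0).length := by omega
        have : (pvWordEnds cs 0 false)[K-1]'hk1' = pvEnd (pvToks cs 0) (K-1) := by
          unfold pvEnd
          rw [getElem!_pos (pvToks cs 0) (K-1) hk1'']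
          simp [hE]
        rw [this]
        simp
    rw [hposA, ← hposB]
    simp only [apply_ite PySem.Chars.rstrip]

-- ===== VERDICT (by name: the statement is the Claim_ definition above) =====
theorem enforce_word_limit_py_spec : Claim_equal_enforce_word_limit_py := by
  intro text max_words hdom
  unfold Spec_enforce_word_limit_py
  exact pv_main text max_words
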